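-- pv_equiv track=rewrite | github.com/AD25aderram/RO-projet | src/pert.py | compute_earliest
-- ===== SOURCE A (Python) =====
-- def compute_earliest(tasks, graph, topo):
--     """
--     Calcule les temps de début au plus tôt (ES) et de fin au plus tôt (EF)
--     """
--
--     # Initialiser les temps de début au plus tôt à zéro
--     earliest_start = {t: 0 for t in tasks}
--     earliest_finish = {}
--
--     for task in topo:
--         # EF = ES + durée
--         earliest_finish[task] = (
--             earliest_start[task] + tasks[task]["duration"]
--         )
--
--         # Mettre à jour les temps de début au plus tôt des successeurs
--         for successor in graph[task]:
--             if earliest_start[successor] < earliest_finish[task]: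
--                 earliest_start[successor] = earliest_finish[task]
--
--     return earliest_start, earliest_finish
-- ===== SOURCE B (Python) =====
-- def compute_earliest(tasks, graph, topo):
--     """Pull-based ES/EF: each task's EF is read off the predecessors recorded
--     so far; ES is rebuilt for every task at the end from the full predecessor
--     map, instead of pushing finish times onto successors as they appear."""
--     preds = {}
--     earliest_finish = {}
--     for task in topo:
--         earliest_finish[task] = (
--             max([0] + [earliest_finish[p] for p in preds.get(task, [])])
--             + tasks[task]["duration"])
--         for successor in graph[task]:
--             preds.setdefault(successor, []).append(task)
--
--     earliest_start = {
--         t: max([0] + [earliest_finish[p] for p in preds.get(t, [])])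
--         for t in tasks
--     }
--     return earliest_start, earliest_finish
-- ===== Notes on version B (the rewrite author's own statement) =====
-- stated objective: alternative
-- what changed: Replaces A's push-based updates of successors' earliest starts with a pull-based scheme: a predecessor map is built while the topo walk computes each EF from the predecessors recorded so far, and every ES is rebuilt at the end as the max of its predecessors' final EFs instead of being pushed incrementally.
import Mathlib
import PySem

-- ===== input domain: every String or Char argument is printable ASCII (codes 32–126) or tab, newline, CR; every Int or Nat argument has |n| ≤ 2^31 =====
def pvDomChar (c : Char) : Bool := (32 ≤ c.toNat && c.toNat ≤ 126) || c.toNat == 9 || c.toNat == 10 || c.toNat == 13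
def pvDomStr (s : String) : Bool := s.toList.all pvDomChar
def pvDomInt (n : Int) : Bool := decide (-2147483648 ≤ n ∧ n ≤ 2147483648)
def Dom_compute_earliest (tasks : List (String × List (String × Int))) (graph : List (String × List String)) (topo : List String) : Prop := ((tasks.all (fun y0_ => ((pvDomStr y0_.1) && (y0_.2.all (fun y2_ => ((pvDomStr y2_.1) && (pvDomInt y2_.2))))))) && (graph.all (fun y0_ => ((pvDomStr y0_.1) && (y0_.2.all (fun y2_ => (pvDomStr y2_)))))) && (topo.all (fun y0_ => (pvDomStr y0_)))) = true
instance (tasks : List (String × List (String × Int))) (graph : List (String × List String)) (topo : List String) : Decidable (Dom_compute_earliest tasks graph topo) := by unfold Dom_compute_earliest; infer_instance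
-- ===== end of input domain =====

-- B replaces A's push of finish times onto successors by pulls from a predecessor map (EF from the predecessors seen so far, every ES rebuilt at the end); alternative decomposition, same cost.

-- ===== PORT A =====
-- tasks[task]["duration"]  (shared indexing expression of both Pythons)
def pvDur (tasks : List (String × List (String × Int))) (task : String) : Int :=
  (PySem.Dict.mk ((PySem.Dict.mk tasks).getD task [])).getD "duration" 0
-- graph[task]  (shared indexing expression of both Pythons)
def pvSuccs (graph : List (String × List String)) (task : String) : List String :=
  (PySem.Dict.mk graph).getD task []
-- body of A's `for task in topo` loop; the KeyError lookups A can hit are excluded by Pre_, so missing keys read defaults here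
def pvStepA (tasks : List (String × List (String × Int))) (graph : List (String × List String))
    (st : PySem.Dict String Int × PySem.Dict String Int) (task : String) :
    PySem.Dict String Int × PySem.Dict String Int :=
  -- earliest_finish[task] = earliest_start[task] + tasks[task]["duration"]
  let eft := st.1.getD task 0 + pvDur tasks task
  let ef := st.2.insert task eft
  -- for successor in graph[task]: if earliest_start[successor] < earliest_finish[task]: earliest_start[successor] = earliest_finish[task]
  let es := (pvSuccs graph task).foldl (fun es s => if es.getD s 0 < eft then es.insert s eft else es) st.1
  (es, ef)

def compute_earliest (tasks : List (String × List (String × Int))) (graph : List (String × List String)) (topo : List String) : (List (String × Int)) × (List (String × Int)) :=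
  -- earliest_start = {t: 0 for t in tasks}; earliest_finish = {}
  let es0 : PySem.Dict String Int := tasks.foldl (fun d p => d.insert p.1 0) PySem.Dict.empty
  let fin := topo.foldl (pvStepA tasks graph) (es0, PySem.Dict.empty)
  (fin.1.items, fin.2.items)

-- ===== PORT B =====
-- max([0] + [earliest_finish[p] for p in preds.get(k, [])])   (Source B's pull expression; Python's max of a list = left fold of max from its head 0)
def pvPull (preds : PySem.Dict String (List String)) (ef : PySem.Dict String Int) (k : String) : Int :=
  ((preds.getD k []).map (fun p => ef.getD p 0)).foldl max 0
-- body of Source B's `for task in topo` loop: EF from the predecessors recorded so far, then record task as predecessor of its successors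
def pvStepB (tasks : List (String × List (String × Int))) (graph : List (String × List String))
    (st : PySem.Dict String Int × PySem.Dict String (List String)) (task : String) :
    PySem.Dict String Int × PySem.Dict String (List String) :=
  let ef := st.1.insert task (pvPull st.2 st.1 task + pvDur tasks task)
  -- for successor in graph[task]: preds.setdefault(successor, []).append(task)
  let pr := (pvSuccs graph task).foldl (fun pr s => pr.insert s (pr.getD s [] ++ [task])) st.2
  (ef, pr)

def compute_earliest_alt (tasks : List (String × List (String × Int))) (graph : List (String × List String)) (topo : List String) : (List (String × Int)) × (List (String × Int)) :=
  let fin := topo.foldl (pvStepB tasks graph) (PySem.Dict.empty, PySem.Dict.empty)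
  -- earliest_start = {t: max([0] + [earliest_finish[p] for p in preds.get(t, [])]) for t in tasks}
  let es : PySem.Dict String Int := tasks.foldl (fun es p => es.insert p.1 (pvPull fin.2 fin.1 p.1)) PySem.Dict.empty
  (es.items, fin.1.items)

-- ===== PRECONDITION & SPEC =====
-- Pre_ excludes exactly (i) the inputs on which A raises a KeyError (a topo task missing from tasks, from graph or without a
-- "duration" entry, or a successor of a topo task missing from tasks), and (ii) association lists with duplicate task keys,
-- which have no Python-dict counterpart.
def Pre_compute_earliest (tasks : List (String × List (String × Int))) (graph : List (String × List String)) (topo : List String) : Prop :=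
  (tasks.map Prod.fst).Nodup ∧
  ∀ t ∈ topo,
    ((PySem.Dict.mk tasks).get? t).isSome = true ∧
    ((PySem.Dict.mk ((PySem.Dict.mk tasks).getD t [])).get? "duration").isSome = true ∧
    ((PySem.Dict.mk graph).get? t).isSome = true ∧
    ∀ s ∈ (PySem.Dict.mk graph).getD t ([] : List String), ((PySem.Dict.mk tasks).get? s).isSome = true
instance (tasks : List (String × List (String × Int))) (graph : List (String × List String)) (topo : List String) : Decidable (Pre_compute_earliest tasks graph topo) := by unfold Pre_compute_earliest; infer_instance

def pvWitness_compute_earliest : (List (String × List (String × Int))) × (List (String × List String)) × List String :=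
  ([("a", [("duration", 2)]), ("b", [("duration", 3)])], [("a", ["b"]), ("b", [])], ["a", "b"])

def Spec_compute_earliest (tasks : List (String × List (String × Int))) (graph : List (String × List String)) (topo : List String) (out : (List (String × Int)) × (List (String × Int))) : Prop := out = compute_earliest_alt tasks graph topo
instance (tasks : List (String × List (String × Int))) (graph : List (String × List String)) (topo : List String) (out : (List (String × Int)) × (List (String × Int))) : Decidable (Spec_compute_earliest tasks graph topo out) := by unfold Spec_compute_earliest; infer_instance

-- ===== CLAIM (what is proved, stated in full; the proofs are below) =====
def Claim_equal_compute_earliest : Prop := ∀ (tasks : List (String × List (String × Int))) (graph : List (String × List String)) (topo : List String), Dom_compute_earliest tasks graph topo → Pre_compute_earliest tasks graph topo → Spec_compute_earliest tasks graph topo (compute_earliest tasks graph topo)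

-- ===== LEMMAS AND PROOFS =====

-- a dict whose items are a key list `ks` paired with values `v`
def pvMap (ks : List String) (v : String → Int) : PySem.Dict String Int :=
  PySem.Dict.mk (ks.map (fun k => (k, v k)))

lemma pvMap_keys (ks : List String) (v : String → Int) : (pvMap ks v).keys = ks := by
  simp only [pvMap, PySem.Dict.keys]
  rw [List.map_map]
  have h : ((fun x : String × Int => x.1) ∘ fun k => (k, v k)) = id := rfl
  rw [h, List.map_id]

lemma pvMap_congr (ks : List String) (v v' : String → Int) (h : ∀ k ∈ ks, v k = v' k) :
    pvMap ks v = pvMap ks v' := by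
  unfold pvMap
  exact congrArg PySem.Dict.mk (List.map_congr_left (fun k hk => by rw [h k hk]))

lemma pvMap_get?_of_mem (ks : List String) (v : String → Int) (k : String) (h : k ∈ ks) :
    (pvMap ks v).get? k = some (v k) := by
  induction ks with
  | nil => simp at h
  | cons a t ih =>
    by_cases hk : a = k
    · subst hk
      simp [pvMap, PySem.Dict.get?_mk_cons]
    · have ht : k ∈ t := by
        rcases List.mem_cons.mp h with h1 | h1
        · exact absurd h1.symm hk
        · exact h1
      have := ih ht
      simpa [pvMap, PySem.Dict.get?_mk_cons, hk] using this

lemma pvMap_getD_of_mem (ks : List String) (v : String → Int) (k : String) (h : k ∈ ks) (d : Int) :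
    (pvMap ks v).getD k d = v k := by
  rw [PySem.Dict.getD_eq_get?_getD, pvMap_get?_of_mem ks v k h]
  rfl

lemma pvMap_contains (ks : List String) (v : String → Int) (k : String) :
    (pvMap ks v).contains k = decide (k ∈ ks) := by
  rw [PySem.Dict.contains_eq_decide_mem_keys, pvMap_keys]

lemma pvMap_insert_mem (ks : List String) (v : String → Int) (k : String) (h : k ∈ ks) (x : Int) :
    (pvMap ks v).insert k x = pvMap ks (fun k' => if k' = k then x else v k') := by
  apply PySem.Dict.ext
  rw [PySem.Dict.items_insert_of_contains _ x (by rw [pvMap_contains]; simpa using h)]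
  show (ks.map (fun k' => (k', v k'))).map _ = _
  rw [List.map_map]
  apply List.map_congr_left
  intro a _
  by_cases ha : a = k
  · subst ha; simp
  · simp [ha]

lemma pv_es0 (tasks : List (String × List (String × Int))) (h : (tasks.map Prod.fst).Nodup) :
    tasks.foldl (fun d p => d.insert p.1 0) PySem.Dict.empty
      = pvMap (tasks.map Prod.fst) (fun _ => (0 : Int)) := by
  apply PySem.Dict.ext
  rw [PySem.Dict.items_foldl_insert_fresh tasks Prod.fst (fun _ => (0 : Int)) PySem.Dict.empty
        (fun a _ => by simp) h]
  show [] ++ tasks.map (fun a => (a.1, (0 : Int))) = (tasks.map Prod.fst).map (fun k => (k, (0 : Int)))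
  rw [List.nil_append, List.map_map]
  rfl

-- Source B's final comprehension {t: f t for t in tasks} as a pvMap
lemma pv_pass3 (tasks : List (String × List (String × Int))) (h : (tasks.map Prod.fst).Nodup)
    (f : String → Int) :
    tasks.foldl (fun es p => es.insert p.1 (f p.1)) PySem.Dict.empty
      = pvMap (tasks.map Prod.fst) f := by
  apply PySem.Dict.ext
  rw [PySem.Dict.items_foldl_insert_fresh tasks Prod.fst (fun p => f p.1) PySem.Dict.empty
        (fun a _ => by simp) h]
  show [] ++ tasks.map (fun p => (p.1, f p.1)) = (tasks.map Prod.fst).map (fun k => (k, f k))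
  rw [List.nil_append, List.map_map]
  rfl

-- ----- max-fold lemmas -----
lemma pv_le_foldl_max (l : List Int) (a : Int) : a ≤ l.foldl max a := by
  induction l generalizing a with
  | nil => simp
  | cons x t ih => exact le_trans (le_max_left a x) (ih (max a x))

lemma pv_foldl_max_le (l : List Int) (a c : Int) (h1 : a ≤ c) (h2 : ∀ x ∈ l, x ≤ c) :
    l.foldl max a ≤ c := by
  induction l generalizing a with
  | nil => simpa using h1
  | cons x t ih =>
    rw [List.foldl_cons]
    exact ih (max a x) (max_le h1 (h2 x List.mem_cons_self)) (fun y hy => h2 y (List.mem_cons_of_mem x hy))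

lemma pv_le_foldl_max_of_mem (l : List Int) (a x : Int) (h : x ∈ l) : x ≤ l.foldl max a := by
  obtain ⟨s, t, rfl⟩ := List.append_of_mem h
  rw [List.foldl_append, List.foldl_cons]
  exact le_trans (le_max_right _ _) (pv_le_foldl_max t _)

-- replacing entries of a list by values dominated by c does not change the max-with-c
lemma pv_max_fold_eq (l l' : List Int) (c : Int)
    (h1 : ∀ y ∈ l', y ∈ l ∨ y ≤ c) (h2 : ∀ x ∈ l, x ∈ l' ∨ x ≤ c) :
    max (l'.foldl max 0) c = max (l.foldl max 0) c := by
  have key : ∀ u v : List Int, (∀ y ∈ u, y ∈ v ∨ y ≤ c) →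
      max (u.foldl max 0) c ≤ max (v.foldl max 0) c := by
    intro u v hu
    apply max_le _ (le_max_right _ _)
    apply pv_foldl_max_le
    · exact le_trans (pv_le_foldl_max v 0) (le_max_left _ _)
    · intro x hx
      rcases hu x hx with h | h
      · exact le_trans (pv_le_foldl_max_of_mem v 0 x h) (le_max_left _ _)
      · exact le_trans h (le_max_right _ _)
  exact le_antisymm (key l' l h1) (key l l' h2)

lemma pv_foldl_max_replicate (n : Nat) (x a : Int) (h : 0 < n) :
    (List.replicate n x).foldl max a = max a x := by
  induction n generalizing a with
  | zero => simp at h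
  | succ n ih =>
    rw [List.replicate_succ, List.foldl_cons]
    rcases Nat.eq_zero_or_pos n with h0 | h0
    · subst h0; simp
    · rw [ih (max a x) h0, max_assoc, max_self]

-- ----- the predecessor-recording inner loop -----
lemma pv_preds_inner_eq (ss : List String) (t k : String) :
    ∀ pr : PySem.Dict String (List String),
      (ss.foldl (fun pr s => pr.insert s (pr.getD s [] ++ [t])) pr).getD k ([] : List String)
        = pr.getD k ([] : List String) ++ List.replicate (ss.count k) t := by
  induction ss with
  | nil => intro pr; simp
  | cons s ss ih =>
    intro pr
    rw [List.foldl_cons, ih, PySem.Dict.getD_insert]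
    by_cases hk : k = s
    · subst hk
      rw [if_pos rfl]
      have hc : (k :: ss).count k = ss.count k + 1 := by simp
      rw [hc, List.append_assoc]
      congr 1
    · rw [if_neg hk]
      have hc : (s :: ss).count k = ss.count k := by
        simp [List.count_cons]
        exact fun h => hk h.symm
      rw [hc]

-- ----- A's successor-push fold -----
lemma pv_push (ks : List String) (ss : List String) (eft : Int) :
    ∀ v : String → Int, (∀ s ∈ ss, s ∈ ks) →
      ss.foldl (fun es s => if es.getD s 0 < eft then es.insert s eft else es) (pvMap ks v)
        = pvMap ks (fun k => if k ∈ ss then max (v k) eft else v k) := by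
  induction ss with
  | nil =>
    intro v _
    simp only [List.foldl_nil]
    exact pvMap_congr _ _ _ (fun k _ => by simp)
  | cons s ss ih =>
    intro v hsub
    have hs : s ∈ ks := hsub s List.mem_cons_self
    rw [List.foldl_cons]
    have hstep : (if (pvMap ks v).getD s 0 < eft then (pvMap ks v).insert s eft else pvMap ks v)
        = pvMap ks (fun k => if k = s then max (v s) eft else v k) := by
      rw [pvMap_getD_of_mem ks v s hs]
      by_cases hlt : v s < eft
      · rw [if_pos hlt, pvMap_insert_mem ks v s hs]
        apply pvMap_congr
        intro k _
        by_cases hks : k = s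
        · simp [hks, max_eq_right (le_of_lt hlt)]
        · simp [hks]
      · rw [if_neg hlt]
        apply pvMap_congr
        intro k _
        by_cases hks : k = s
        · simp [hks, max_eq_left (not_lt.mp hlt)]
        · simp [hks]
    rw [hstep, ih _ (fun x hx => hsub x (List.mem_cons_of_mem s hx))]
    apply pvMap_congr
    intro k _
    by_cases h2 : k = s
    · subst h2
      by_cases h1 : k ∈ ss
      · simp [h1]
      · simp [h1]
    · by_cases h1 : k ∈ ss
      · simp [h1, h2]
      · simp [h1, h2]

lemma pv_mem_keys_of_isSome (l : List (String × List (String × Int))) (k : String)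
    (h : ((PySem.Dict.mk l).get? k).isSome = true) : k ∈ l.map Prod.fst := by
  by_contra hk
  have : (PySem.Dict.mk l).get? k = none := by
    rw [PySem.Dict.get?_eq_none_iff_not_mem_keys]
    simpa [PySem.Dict.keys] using hk
  rw [this] at h
  simp at h

-- ----- the main loop invariant: A's fold against B's fold -----
lemma pv_loop_eq (tasks : List (String × List (String × Int))) (graph : List (String × List String)) :
    ∀ (rest : List String) (vA : String → Int) (ef : PySem.Dict String Int)
      (pr : PySem.Dict String (List String)),
      (∀ t ∈ rest, t ∈ tasks.map Prod.fst ∧ ∀ s ∈ pvSuccs graph t, s ∈ tasks.map Prod.fst) →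
      (∀ k ∈ tasks.map Prod.fst, vA k = pvPull pr ef k) →
      (∀ k p, p ∈ pr.getD k ([] : List String) → k ∈ pvSuccs graph p ∧ ef.contains p = true) →
      (∀ p, ef.contains p = true → ef.getD p 0 ≤ vA p + pvDur tasks p) →
      (rest.foldl (pvStepA tasks graph) (pvMap (tasks.map Prod.fst) vA, ef)).1
          = pvMap (tasks.map Prod.fst)
              (pvPull (rest.foldl (pvStepB tasks graph) (ef, pr)).2 (rest.foldl (pvStepB tasks graph) (ef, pr)).1)
        ∧ (rest.foldl (pvStepA tasks graph) (pvMap (tasks.map Prod.fst) vA, ef)).2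
          = (rest.foldl (pvStepB tasks graph) (ef, pr)).1 := by
  intro rest
  induction rest with
  | nil =>
    intro vA ef pr _ hI1 _ _
    simp only [List.foldl_nil]
    exact ⟨pvMap_congr _ _ _ hI1, trivial⟩
  | cons t rest' ih =>
    intro vA ef pr hks hI1 hI2 hI3
    obtain ⟨htks, hsucc⟩ := hks t List.mem_cons_self
    set eft := vA t + pvDur tasks t with heft
    have hA : pvStepA tasks graph (pvMap (tasks.map Prod.fst) vA, ef) t
        = (pvMap (tasks.map Prod.fst) (fun k => if k ∈ pvSuccs graph t then max (vA k) eft else vA k),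
           ef.insert t eft) := by
      unfold pvStepA
      simp only [pvMap_getD_of_mem (tasks.map Prod.fst) vA t htks]
      rw [Prod.mk.injEq]
      exact ⟨pv_push (tasks.map Prod.fst) (pvSuccs graph t) eft vA hsucc, rfl⟩
    have hB : pvStepB tasks graph (ef, pr) t
        = (ef.insert t eft,
           (pvSuccs graph t).foldl (fun pr s => pr.insert s (pr.getD s [] ++ [t])) pr) := by
      unfold pvStepB
      rw [Prod.mk.injEq]
      exact ⟨by rw [← hI1 t htks], rfl⟩
    rw [List.foldl_cons, List.foldl_cons, hA, hB]
    apply ih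
    · intro x hx; exact hks x (List.mem_cons_of_mem t hx)
    · -- I1 preserved
      intro k hkks
      show (if k ∈ pvSuccs graph t then max (vA k) eft else vA k)
          = pvPull ((pvSuccs graph t).foldl (fun pr s => pr.insert s (pr.getD s [] ++ [t])) pr) (ef.insert t eft) k
      unfold pvPull
      rw [pv_preds_inner_eq, List.map_append, List.foldl_append, List.map_replicate]
      have hins : (ef.insert t eft).getD t 0 = eft := by
        rw [PySem.Dict.getD_insert]; simp
      rw [hins]
      by_cases hkt : k ∈ pvSuccs graph t
      · rw [if_pos hkt]
        have hc : 0 < (pvSuccs graph t).count k := List.count_pos_iff.mpr hkt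
        rw [pv_foldl_max_replicate _ _ _ hc, hI1 k hkks]
        unfold pvPull
        refine pv_max_fold_eq
            ((pr.getD k ([] : List String)).map (fun p => (ef.insert t eft).getD p 0))
            ((pr.getD k ([] : List String)).map (fun p => ef.getD p 0)) eft ?_ ?_
        · -- entries read through the old ef are in the new map or dominated by eft
          intro y hy
          obtain ⟨p, hp, rfl⟩ := List.mem_map.mp hy
          by_cases hpt : p = t
          · right
            rw [hpt]
            exact le_trans (hI3 t (hI2 k t (hpt ▸ hp)).2) (le_of_eq heft.symm)
          · left
            refine List.mem_map.mpr ⟨p, hp, ?_⟩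
            rw [PySem.Dict.getD_insert, if_neg hpt]
        · -- entries read through the updated ef are in the old map or dominated by eft
          intro x hx
          obtain ⟨p, hp, rfl⟩ := List.mem_map.mp hx
          by_cases hpt : p = t
          · right
            rw [hpt, PySem.Dict.getD_insert, if_pos rfl]
          · left
            refine List.mem_map.mpr ⟨p, hp, ?_⟩
            rw [PySem.Dict.getD_insert, if_neg hpt]
      · rw [if_neg hkt]
        have hc : (pvSuccs graph t).count k = 0 := List.count_eq_zero.mpr hkt
        rw [hc]
        simp only [List.replicate_zero, List.foldl_nil]
        have hmap : (pr.getD k ([] : List String)).map (fun p => (ef.insert t eft).getD p 0)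
            = (pr.getD k ([] : List String)).map (fun p => ef.getD p 0) := by
          apply List.map_congr_left
          intro p hp
          have hpt : p ≠ t := fun hph => hkt (hph ▸ (hI2 k p hp).1)
          rw [PySem.Dict.getD_insert, if_neg hpt]
        rw [hmap, hI1 k hkks]
        rfl
    · -- I2 preserved
      intro k p hp
      rw [pv_preds_inner_eq] at hp
      rcases List.mem_append.mp hp with h | h
      · obtain ⟨hsp, hcont⟩ := hI2 k p h
        refine ⟨hsp, ?_⟩
        rw [PySem.Dict.contains_insert]
        simp [hcont]
      · have hpt := List.eq_of_mem_replicate h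
        rw [hpt]
        constructor
        · by_contra hkt
          rw [List.count_eq_zero.mpr hkt] at h
          simp at h
        · rw [PySem.Dict.contains_insert]
          simp
    · -- I3 preserved
      intro p hcont
      have hle : ∀ q, vA q ≤ (if q ∈ pvSuccs graph t then max (vA q) eft else vA q) := by
        intro q
        by_cases hq : q ∈ pvSuccs graph t
        · simp [hq]
        · simp [hq]
      rw [PySem.Dict.getD_insert]
      by_cases hpt : p = t
      · subst hpt
        rw [if_pos rfl, heft]
        exact add_le_add (hle p) (le_refl _)
      · rw [if_neg hpt]
        have hcont' : ef.contains p = true := by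
          rw [PySem.Dict.contains_insert] at hcont
          simpa [hpt] using hcont
        exact le_trans (hI3 p hcont') (add_le_add (hle p) (le_refl _))

-- ===== VERDICT (by name: the statement is the Claim_ definition above) =====
theorem compute_earliest_spec : Claim_equal_compute_earliest := by
  intro tasks graph topo _ hpre
  obtain ⟨hnk, hmem'⟩ := hpre
  have hmem : ∀ t ∈ topo, t ∈ tasks.map Prod.fst ∧ ∀ s ∈ pvSuccs graph t, s ∈ tasks.map Prod.fst := by
    intro t ht
    obtain ⟨h1, _, _, h4⟩ := hmem' t ht
    exact ⟨pv_mem_keys_of_isSome tasks t h1, fun s hs => pv_mem_keys_of_isSome tasks s (h4 s hs)⟩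
  have hloop := pv_loop_eq tasks graph topo (fun _ => 0) PySem.Dict.empty PySem.Dict.empty hmem
    (fun k _ => by simp [pvPull, PySem.Dict.getD_empty])
    (fun k p hp => by rw [PySem.Dict.getD_empty] at hp; simp at hp)
    (fun p hc => by rw [PySem.Dict.contains_empty] at hc; simp at hc)
  show compute_earliest tasks graph topo = compute_earliest_alt tasks graph topo
  simp only [compute_earliest, compute_earliest_alt]
  rw [pv_es0 tasks hnk, hloop.1, hloop.2,
      pv_pass3 tasks hnk
        (pvPull (topo.foldl (pvStepB tasks graph) (PySem.Dict.empty, PySem.Dict.empty)).2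
                (topo.foldl (pvStepB tasks graph) (PySem.Dict.empty, PySem.Dict.empty)).1)]
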